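-- pv_equiv track=rewrite | github.com/pypi-data/pypi-mirror-189 | packages/devos-py/devos-py-1.0.0.tar.gz/devos-py-1.0.0/devos/util.py | get_possible_joins
-- ===== SOURCE A (Python) =====
-- def get_possible_joins(tokens, joiners=[" "]):
--
--     """
--     Different characters to join the tokens
--     """
--     if len(tokens) == 1:
--         return tokens
--
--     poss = []  # possibilities
--     for merged_tokens in get_possible_joins(tokens[1:], joiners=joiners):
--         for j in joiners:
--             t = tokens[0] + j + merged_tokens
--             poss.append(t)
--     return poss
-- ===== SOURCE B (Python) =====
-- def get_possible_joins(tokens, joiners=[" "]):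
--     n = len(tokens)
--     if n == 1:
--         return tokens
--     m = len(joiners)
--     out = []
--     for idx in range(m ** (n - 1)):
--         s = tokens[0]
--         x = idx
--         for tok in tokens[1:]:
--             s += joiners[x % m] + tok
--             x //= m
--         out.append(s)
--     return out
-- ===== Notes on version B (the rewrite author's own statement) =====
-- stated objective: alternative
-- what changed: Replaces A's tail recursion over the token list (building all joinings of the suffix, then prefixing) by a single non-recursive loop that enumerates the m^(n-1) joiner choices as base-m numbers and decodes each index digit by digit while building the string left to right.
-- outside the precondition, e.g. on get_possible_joins([], [' ']): A raises RecursionError, B raises TypeError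
import Mathlib
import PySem

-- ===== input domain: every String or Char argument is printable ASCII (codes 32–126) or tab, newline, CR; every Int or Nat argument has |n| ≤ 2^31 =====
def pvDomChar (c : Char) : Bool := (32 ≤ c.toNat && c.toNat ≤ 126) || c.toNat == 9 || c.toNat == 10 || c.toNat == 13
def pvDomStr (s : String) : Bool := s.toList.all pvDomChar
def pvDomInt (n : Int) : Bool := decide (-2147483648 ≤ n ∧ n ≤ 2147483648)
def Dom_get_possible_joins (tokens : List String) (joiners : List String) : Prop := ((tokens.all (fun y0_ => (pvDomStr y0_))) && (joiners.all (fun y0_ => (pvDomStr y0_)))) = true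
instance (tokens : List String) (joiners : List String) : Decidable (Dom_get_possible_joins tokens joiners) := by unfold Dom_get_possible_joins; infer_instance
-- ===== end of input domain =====

-- B replaces A's tail recursion by a single base-m odometer loop over range(m**(n-1)); objective: simpler (iterative, no recursion).

-- ===== PORT A =====
-- Literal port of A. On tokens = [] Python recurses forever (RecursionError);
-- that input is excluded by Pre_, the [] branch here is an arbitrary total-izer.
def get_possible_joins (tokens : List String) (joiners : List String) : List String :=
  match tokens with
  | [] => []
  | t :: ts =>
    if (t :: ts).length == 1 then t :: ts
    else
      (get_possible_joins ts joiners).foldl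
        (fun poss merged => joiners.foldl (fun poss j => poss ++ [t ++ j ++ merged]) poss) []

-- ===== PORT B =====
-- Literal port of Source B. range(m**(n-1)) → List.range (exact: the bound is a
-- nonnegative int for n ≥ 1); joiners[x % m] is in range whenever the loop body
-- runs (m > 0 there), so getD is exact; tokens[0] → headD, exact for tokens ≠ [].
def get_possible_joins_alt (tokens : List String) (joiners : List String) : List String :=
  if tokens.length == 1 then tokens
  else
    let m := joiners.length
    (List.range (m ^ (tokens.length - 1))).foldl
      (fun out idx =>
        let p := (tokens.drop 1).foldl
          (fun (p : String × Nat) tok => (p.1 ++ joiners.getD (p.2 % m) "" ++ tok, p.2 / m))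
          (tokens.headD "", idx)
        out ++ [p.1])
      []

-- ===== PRECONDITION & SPEC =====
-- Pre_ excludes tokens = [], on which Python A recurses forever (RecursionError).
def Pre_get_possible_joins (tokens : List String) (joiners : List String) : Prop := tokens ≠ []
instance (tokens : List String) (joiners : List String) : Decidable (Pre_get_possible_joins tokens joiners) := by unfold Pre_get_possible_joins; infer_instance
def pvWitness_get_possible_joins : List String × List String := (["a", "b"], [" "])
def Spec_get_possible_joins (tokens : List String) (joiners : List String) (out : List String) : Prop := out = get_possible_joins_alt tokens joiners
instance (tokens : List String) (joiners : List String) (out : List String) : Decidable (Spec_get_possible_joins tokens joiners out) := by unfold Spec_get_possible_joins; infer_instance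

-- ===== CLAIM (what is proved, stated in full; the proofs are below) =====
def Claim_equal_get_possible_joins : Prop := ∀ (tokens : List String) (joiners : List String), Dom_get_possible_joins tokens joiners → Pre_get_possible_joins tokens joiners → Spec_get_possible_joins tokens joiners (get_possible_joins tokens joiners)

-- ===== LEMMAS AND PROOFS =====

-- Common specification: the lexicographic join enumeration, first gap fastest.
def pvSpec (joiners : List String) (t : String) (ts : List String) : List String :=
  match ts with
  | [] => [t]
  | u :: us => (pvSpec joiners u us).flatMap (fun s => joiners.map (fun j => t ++ j ++ s))

-- A's inner loop appends joiners.map.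
theorem pv_inner (joiners : List String) (t s : String) (acc : List String) :
    joiners.foldl (fun poss j => poss ++ [t ++ j ++ s]) acc
      = acc ++ joiners.map (fun j => t ++ j ++ s) := by
  induction joiners generalizing acc with
  | nil => simp
  | cons j js ih => simp [List.foldl, ih]

-- A's outer loop is a flatMap.
theorem pv_outer (joiners : List String) (t : String) (l acc : List String) :
    l.foldl (fun poss merged => joiners.foldl (fun poss j => poss ++ [t ++ j ++ merged]) poss) acc
      = acc ++ l.flatMap (fun s => joiners.map (fun j => t ++ j ++ s)) := by
  induction l generalizing acc with
  | nil => simp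
  | cons x xs ih =>
    simp only [List.foldl]
    rw [pv_inner, ih]
    simp

theorem pv_A_spec (joiners : List String) (ts : List String) (t : String) :
    get_possible_joins (t :: ts) joiners = pvSpec joiners t ts := by
  induction ts generalizing t with
  | nil => simp [get_possible_joins, pvSpec]
  | cons u us ih =>
    show get_possible_joins (t :: u :: us) joiners = _
    rw [get_possible_joins]
    simp only [List.length_cons, pvSpec]
    rw [if_neg (by simp), ih, pv_outer]
    simp

-- B's odometer step / string builder.
def pvStep (joiners : List String) (p : String × Nat) (tok : String) : String × Nat :=
  (p.1 ++ joiners.getD (p.2 % joiners.length) "" ++ tok, p.2 / joiners.length)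

def pvStr (joiners : List String) (t : String) (ts : List String) (idx : Nat) : String :=
  (ts.foldl (pvStep joiners) (t, idx)).1

theorem pv_foldl_snoc {α β : Type} (f : α → β) (l : List α) (acc : List β) :
    l.foldl (fun out x => out ++ [f x]) acc = acc ++ l.map f := by
  induction l generalizing acc with
  | nil => simp
  | cons x xs ih => simp [List.foldl, ih]

theorem pv_str_prefix (joiners : List String) (ts : List String) (p s : String) (idx : Nat) :
    (ts.foldl (pvStep joiners) (p ++ s, idx)).1 = p ++ (ts.foldl (pvStep joiners) (s, idx)).1 := by
  induction ts generalizing s idx with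
  | nil => rfl
  | cons tok ts ih =>
    simp only [List.foldl, pvStep]
    have h : (p ++ s) ++ joiners.getD (idx % joiners.length) "" ++ tok
        = p ++ (s ++ joiners.getD (idx % joiners.length) "" ++ tok) := by
      simp [String.append_assoc]
    rw [h]
    exact ih _ _

theorem pv_str_cons (joiners : List String) (t u : String) (us : List String) (idx : Nat) :
    pvStr joiners t (u :: us) idx
      = t ++ joiners.getD (idx % joiners.length) "" ++ pvStr joiners u us (idx / joiners.length) := by
  unfold pvStr
  simp only [List.foldl, pvStep]
  exact pv_str_prefix joiners us (t ++ joiners.getD (idx % joiners.length) "") u (idx / joiners.length)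

theorem pv_range_mul {β : Type} (f : Nat → β) (N m : Nat) :
    (List.range (N * m)).map f
      = (List.range N).flatMap (fun q => (List.range m).map (fun d => f (q * m + d))) := by
  induction N with
  | zero => simp
  | succ n ih =>
    rw [Nat.succ_mul, List.range_add, List.map_append, ih, List.range_succ, List.flatMap_append]
    simp [Nat.add_comm]

theorem pv_getD_enum (l : List String) :
    (List.range l.length).map (fun d => l.getD d "") = l := by
  apply List.ext_getElem
  · simp
  · intro i h1 h2
    simp only [List.getElem_map, List.getElem_range]
    rw [List.getD_eq_getElem]

theorem pv_map_getD {β : Type} (l : List String) (g : String → β) :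
    (List.range l.length).map (fun d => g (l.getD d "")) = l.map g := by
  rw [show (fun d => g (l.getD d "")) = g ∘ (fun d => l.getD d "") from rfl,
    ← List.map_map, pv_getD_enum]

theorem pv_B_map (joiners : List String) (ts : List String) (t : String) :
    (List.range (joiners.length ^ ts.length)).map (fun idx => pvStr joiners t ts idx)
      = pvSpec joiners t ts := by
  induction ts generalizing t with
  | nil => simp [pvStr, pvSpec]
  | cons u us ih =>
    have hfun : ∀ q : Nat, (List.range joiners.length).map
        (fun d => pvStr joiners t (u :: us) (q * joiners.length + d))
        = joiners.map (fun j => t ++ j ++ pvStr joiners u us q) := by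
      intro q
      rw [← pv_map_getD joiners (fun j => t ++ j ++ pvStr joiners u us q)]
      apply List.map_congr_left
      intro d hd
      have hdm : d < joiners.length := List.mem_range.mp hd
      have hm : 0 < joiners.length := Nat.lt_of_le_of_lt (Nat.zero_le d) hdm
      rw [pv_str_cons, Nat.mul_comm q joiners.length, Nat.mul_add_mod, Nat.mod_eq_of_lt hdm,
        Nat.mul_add_div hm, Nat.div_eq_of_lt hdm, Nat.add_zero]
    rw [pvSpec, ← ih u, List.flatMap_map, List.length_cons, pow_succ, pv_range_mul]
    simp only [hfun]

theorem pv_B_spec (joiners : List String) (ts : List String) (t : String) :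
    get_possible_joins_alt (t :: ts) joiners = pvSpec joiners t ts := by
  cases ts with
  | nil => simp [get_possible_joins_alt, pvSpec]
  | cons u us =>
    rw [get_possible_joins_alt, if_neg (by simp)]
    show (List.range (joiners.length ^ ((t :: u :: us).length - 1))).foldl
        (fun out idx => out ++ [pvStr joiners t (u :: us) idx]) [] = _
    rw [pv_foldl_snoc (fun idx => pvStr joiners t (u :: us) idx)]
    have hlen : (t :: u :: us).length - 1 = (u :: us).length := by simp
    rw [List.nil_append, hlen, pv_B_map]

-- ===== VERDICT (by name: the statement is the Claim_ definition above) =====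
theorem get_possible_joins_spec : Claim_equal_get_possible_joins := by
  intro tokens joiners _ hpre
  unfold Spec_get_possible_joins
  cases tokens with
  | nil => exact absurd rfl hpre
  | cons t ts => rw [pv_A_spec, pv_B_spec]
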